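-- pv_equiv track=rewrite | github.com/wasimsse/CodeRefactorAI | metrics_calculator.py | _calculate_halstead_volume
-- ===== SOURCE A (Python) =====
-- def _calculate_halstead_volume(content: str) -> float:
--     """Calculate Halstead volume metric."""
--     operators = set()
--     operands = set()
--
--     # Simple parsing for demonstration
--     words = content.split()
--     for word in words:
--         if word in ['if', 'else', 'while', 'for', 'in', 'return', '+', '-', '*', '/', '=', '==', '!=']:
--             operators.add(word)
--         else:
--             operands.add(word)
--
--     n1 = len(operators)  # unique operators
--     n2 = len(operands)   # unique operands
--     N = len(words)       # total length
--
--     if n1 + n2 == 0: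
--         return 0
--
--     volume = N * (n1 + n2).bit_length()  # simplified Halstead volume
--     return volume
-- ===== SOURCE B (Python) =====
-- def _calculate_halstead_volume(content: str) -> float:
--     """Simplified Halstead volume by sort-and-scan: operators and operands
--     partition the distinct words, so n1+n2 is the distinct-word count; count it
--     by sorting and counting adjacent boundaries, and compute the bit length by
--     a halving loop (no sets, no int.bit_length)."""
--     words = content.split()
--     if not words:
--         return 0
--     ws = sorted(words)
--     distinct = 1
--     for a, b in zip(ws, ws[1:]):
--         if a != b:
--             distinct += 1
--     bits = 0
--     while distinct > 0:
--         bits += 1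
--         distinct >>= 1
--     return len(words) * bits
-- ===== Notes on version B (the rewrite author's own statement) =====
-- stated objective: alternative
-- what changed: Replaced the two-set classification pass with sort-and-scan: B sorts the words, counts distinct words as 1 + adjacent boundaries (operators and operands partition the distinct words so n1+n2 is that count), and computes the bit length by an explicit halving loop instead of int.bit_length.
import Mathlib
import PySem

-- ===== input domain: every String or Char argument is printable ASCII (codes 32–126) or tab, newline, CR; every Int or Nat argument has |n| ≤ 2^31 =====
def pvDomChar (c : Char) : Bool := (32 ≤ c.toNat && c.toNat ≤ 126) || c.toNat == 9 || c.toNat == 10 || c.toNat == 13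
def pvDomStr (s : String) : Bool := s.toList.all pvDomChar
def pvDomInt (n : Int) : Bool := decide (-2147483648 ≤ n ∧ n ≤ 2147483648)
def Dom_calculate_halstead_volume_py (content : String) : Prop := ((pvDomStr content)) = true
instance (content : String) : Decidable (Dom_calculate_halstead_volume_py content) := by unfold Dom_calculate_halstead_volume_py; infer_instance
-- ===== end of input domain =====

-- B replaces A's two-set classification pass by sort-and-scan: operators and operands
-- partition the distinct words, so n1+n2 is the distinct-word count, counted as
-- 1 + adjacent boundaries of the sorted word list; the bit length is a halving loop
-- (objective: alternative).

-- ===== PORT A =====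
def halsteadOperators : List String :=
  ["if", "else", "while", "for", "in", "return", "+", "-", "*", "/", "=", "==", "!="]

def calculate_halstead_volume_py (content : String) : Int :=
  let words := PySem.Str.split₀ content
  let st := words.foldl
    (fun (p : PySem.Set String × PySem.Set String) word =>
      if word ∈ halsteadOperators then (PySem.Set.add p.1 word, p.2)
      else (p.1, PySem.Set.add p.2 word))
    (PySem.Set.empty, PySem.Set.empty)
  let n1 : Int := PySem.Set.len st.1
  let n2 : Int := PySem.Set.len st.2
  let N : Int := PySem.List.len words
  if n1 + n2 = 0 then 0
  else N * (PySem.Int.bitLength (n1 + n2) : Int)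

-- ===== PORT B =====
-- the 'while distinct > 0: bits += 1; distinct >>= 1' loop of Source B; distinct is
-- nonnegative throughout, so it is tracked as a Nat ('>> 1' = '/ 2', exact here)
def pvBitHalve (d : Nat) : Nat :=
  if d = 0 then 0 else pvBitHalve (d / 2) + 1
decreasing_by exact Nat.div_lt_self (Nat.pos_of_ne_zero (by assumption)) (by omega)

def calculate_halstead_volume_py_alt (content : String) : Int :=
  let words := PySem.Str.split₀ content
  if words = [] then 0
  else
    let ws := PySem.List.sorted words (fun x => x) false
    -- 'for a, b in zip(ws, ws[1:]): if a != b: distinct += 1' starting from 1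
    let distinct : Nat :=
      (ws.zip ws.tail).foldl (fun acc p => if p.1 = p.2 then acc else acc + 1) 1
    (PySem.List.len words) * (pvBitHalve distinct : Int)

-- ===== PRECONDITION & SPEC =====
def Spec_calculate_halstead_volume_py (content : String) (out : Int) : Prop := out = calculate_halstead_volume_py_alt content
instance (content : String) (out : Int) : Decidable (Spec_calculate_halstead_volume_py content out) := by unfold Spec_calculate_halstead_volume_py; infer_instance

-- ===== CLAIM (what is proved, stated in full; the proofs are below) =====
def Claim_equal_calculate_halstead_volume_py : Prop := ∀ (content : String), Dom_calculate_halstead_volume_py content → Spec_calculate_halstead_volume_py content (calculate_halstead_volume_py content)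

-- ===== LEMMAS AND PROOFS =====

-- A-side invariant: the classification fold's two set sizes sum to the size of the
-- seen-set, as long as the accumulators partition the seen-set by the operator test
theorem halstead_fold_len (words : List String) :
    ∀ (ops opds seen : List String),
      (∀ x ∈ ops, x ∈ halsteadOperators) →
      (∀ x ∈ opds, x ∉ halsteadOperators) →
      (∀ x, x ∈ seen ↔ x ∈ ops ∨ x ∈ opds) →
      seen.length = ops.length + opds.length →
      (words.foldl
        (fun (p : PySem.Set String × PySem.Set String) word =>
          if word ∈ halsteadOperators then (PySem.Set.add p.1 word, p.2)
          else (p.1, PySem.Set.add p.2 word))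
        (ops, opds)).1.length +
      (words.foldl
        (fun (p : PySem.Set String × PySem.Set String) word =>
          if word ∈ halsteadOperators then (PySem.Set.add p.1 word, p.2)
          else (p.1, PySem.Set.add p.2 word))
        (ops, opds)).2.length
      = (PySem.Set.update seen words).length := by
  induction words with
  | nil =>
    intro ops opds seen _ _ _ hlen
    simpa [PySem.Set.update] using hlen.symm
  | cons w ws ih =>
    intro ops opds seen hops hopds hmem hlen
    rw [PySem.Set.update_cons]
    by_cases hw : w ∈ halsteadOperators
    · simp only [List.foldl_cons, if_pos hw]
      refine ih (PySem.Set.add ops w) opds (PySem.Set.add seen w) ?_ hopds ?_ ?_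
      · intro x hx
        rcases (PySem.Set.mem_add _ _ _).1 hx with h | h
        · exact hops x h
        · exact h ▸ hw
      · intro x
        simp only [PySem.Set.mem_add, hmem x]; tauto
      · by_cases hmemw : w ∈ ops
        · rw [PySem.Set.add_of_mem ((hmem w).2 (Or.inl hmemw)),
            PySem.Set.add_of_mem hmemw, hlen]
        · have hnseen : w ∉ seen := by
            rw [hmem w]
            rintro (h | h)
            · exact hmemw h
            · exact hopds w h hw
          rw [PySem.Set.add_of_not_mem hnseen, PySem.Set.add_of_not_mem hmemw]
          simp [hlen]; omega
    · simp only [List.foldl_cons, if_neg hw]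
      refine ih ops (PySem.Set.add opds w) (PySem.Set.add seen w) hops ?_ ?_ ?_
      · intro x hx
        rcases (PySem.Set.mem_add _ _ _).1 hx with h | h
        · exact hopds x h
        · exact h ▸ hw
      · intro x
        simp only [PySem.Set.mem_add, hmem x]; tauto
      · by_cases hmemw : w ∈ opds
        · rw [PySem.Set.add_of_mem ((hmem w).2 (Or.inr hmemw)),
            PySem.Set.add_of_mem hmemw, hlen]
        · have hnseen : w ∉ seen := by
            rw [hmem w]
            rintro (h | h)
            · exact hw (hops w h)
            · exact hmemw h
          rw [PySem.Set.add_of_not_mem hnseen, PySem.Set.add_of_not_mem hmemw]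
          simp [hlen]; omega

-- the halving loop computes Python's int.bit_length on nonnegative ints
theorem pvBitHalve_eq_bitLength (m : Nat) : pvBitHalve m = PySem.Int.bitLength (m : Int) := by
  induction m using Nat.strong_induction_on with
  | _ m ih =>
    by_cases h0 : m = 0
    · subst h0; rw [pvBitHalve]; simp
    · rw [pvBitHalve, if_neg h0,
        PySem.Int.bitLength_natCast (Nat.pos_of_ne_zero h0),
        ih (m / 2) (Nat.div_lt_self (Nat.pos_of_ne_zero h0) (by omega))]

-- the boundary fold shifts its accumulator
theorem boundary_foldl_shift (L : List (String × String)) :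
    ∀ n : Nat, L.foldl (fun acc p => if p.1 = p.2 then acc else acc + 1) n
      = n + L.countP (fun p => decide (p.1 ≠ p.2)) := by
  induction L with
  | nil => intro n; simp
  | cons p t ih =>
    intro n
    simp only [List.foldl_cons, List.countP_cons, ih]
    by_cases h : p.1 = p.2
    · simp [h]
    · simp [h]
      omega

-- in a sorted list, 1 + adjacent boundaries = number of distinct elements
theorem sorted_boundaries (t : List String) :
    ∀ a : String, (a :: t).Pairwise (· ≤ ·) →
      1 + ((a :: t).zip t).countP (fun p => decide (p.1 ≠ p.2)) = (a :: t).dedup.length := by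
  induction t with
  | nil => intro a _; simp
  | cons b t' ih =>
    intro a h
    have hab : a ≤ b := (List.pairwise_cons.1 h).1 b (by simp)
    have htl : (b :: t').Pairwise (· ≤ ·) := (List.pairwise_cons.1 h).2
    have hzip : ((a :: b :: t').zip (b :: t')) = (a, b) :: ((b :: t').zip t') := by
      simp [List.zip]
    rw [hzip, List.countP_cons]
    by_cases hne : a = b
    · subst hne
      rw [List.dedup_cons_of_mem (List.mem_cons_self ..)]
      simpa using ih a htl
    · have hnotmem : a ∉ b :: t' := by
        intro hmem
        rcases List.mem_cons.1 hmem with h' | h'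
        · exact hne h'
        · have hba : b ≤ a := List.rel_of_pairwise_cons htl h'
          exact hne (le_antisymm hab hba)
      rw [List.dedup_cons_of_notMem hnotmem]
      have hrec := ih b htl
      rw [if_pos (by simp [hne] : (decide ((a, b).1 ≠ (a, b).2)) = true)]
      simp only [List.length_cons, ← hrec]
      omega

-- two nodup lists with the same members have equal length
theorem length_eq_of_nodup_same_mem {α : Type} [DecidableEq α] (l₁ l₂ : List α)
    (h₁ : l₁.Nodup) (h₂ : l₂.Nodup) (hm : ∀ x, x ∈ l₁ ↔ x ∈ l₂) :
    l₁.length = l₂.length :=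
  ((List.perm_ext_iff_of_nodup h₁ h₂).2 hm).length_eq

-- common characterisation: the distinct-word count, via each side's data structure
theorem alt_distinct_eq (words : List String) (hne : words ≠ []) :
    ((PySem.List.sorted words (fun x => x) false).zip
        (PySem.List.sorted words (fun x => x) false).tail).foldl
      (fun acc p => if p.1 = p.2 then acc else acc + 1) 1
    = (PySem.Set.ofList words).length := by
  set ws := PySem.List.sorted words (fun x => x) false with hws
  have hperm : ws.Perm words := PySem.List.sorted_perm words (fun x => x) false
  have hwsne : ws ≠ [] := by
    intro h; exact hne (List.Perm.nil_eq (h ▸ hperm)).symm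
  obtain ⟨a, t, hat⟩ := List.exists_cons_of_ne_nil hwsne
  have hpw : (a :: t).Pairwise (· ≤ ·) := by
    have := PySem.List.sorted_pairwise words (fun x => x)
    rw [← hws, hat] at this
    exact this
  rw [hat]
  simp only [List.tail_cons]
  rw [boundary_foldl_shift, sorted_boundaries t a hpw]
  have h1 : (a :: t).dedup.length = words.dedup.length :=
    ((hat ▸ hperm).dedup).length_eq
  rw [h1]
  exact length_eq_of_nodup_same_mem _ _ (List.nodup_dedup words)
    (PySem.Set.nodup_ofList words)
    (fun x => by rw [List.mem_dedup, PySem.Set.mem_ofList])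

-- ===== VERDICT (by name: the statement is the Claim_ definition above) =====
theorem calculate_halstead_volume_py_spec : Claim_equal_calculate_halstead_volume_py := by
  intro content _
  unfold Spec_calculate_halstead_volume_py calculate_halstead_volume_py calculate_halstead_volume_py_alt
  generalize PySem.Str.split₀ content = words
  have key := halstead_fold_len words [] [] []
    (by simp) (by simp) (by simp) (by simp)
  simp only [PySem.Set.update_nil_left] at key
  simp only [PySem.Set.len, PySem.Set.empty]
  by_cases hnil : words = []
  · subst hnil; simp
  · rw [if_neg hnil]
    have hdve := alt_distinct_eq words hnil
    have hpos : (PySem.Set.ofList words).length ≠ 0 := by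
      obtain ⟨a, t, hat⟩ := List.exists_cons_of_ne_nil hnil
      intro h
      have : a ∈ PySem.Set.ofList words := (PySem.Set.mem_ofList _ _).2 (hat ▸ List.mem_cons_self ..)
      rw [List.length_eq_zero_iff.1 h] at this
      exact absurd this (List.not_mem_nil)
    rw [if_neg (by omega)]
    rw [hdve, pvBitHalve_eq_bitLength]
    congr 2
    rw [← key]
    push_cast
    omega
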